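-- pv_equiv track=rewrite | github.com/unicamp-dl/Lissard | src/repeat_copy_logic/portuguese.py | x_all_the_world
-- ===== SOURCE A (Python) =====
-- def x_all_the_world(times):
--     '''
--     Repeat all the world seven times, and after every second time add is a stage.
--     '''
--     out = ''
--     count = 0
--     range_ = int(times/2)
--     for x in range(0, times+range_):
--         if count == 2:
--             out+='é um palco '
--             count=0
--         else:
--             out+='o mundo inteiro '
--             count+=1
--     return out.strip()
-- ===== SOURCE B (Python) =====
-- def x_all_the_world(times):
--     total = times + int(times / 2)
--     if total <= 0:
--         return ''
--     q, r = divmod(total, 3)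
--     return ('o mundo inteiro o mundo inteiro é um palco ' * q
--             + 'o mundo inteiro ' * r).strip()
-- ===== Notes on version B (the rewrite author's own statement) =====
-- stated objective: faster
-- what changed: Replaces the counting accumulation loop by a closed form: the iteration count is split by integer division/modulo on the period length into whole 'o mundo inteiro o mundo inteiro é um palco ' blocks plus a remainder of 'o mundo inteiro ' copies, assembled with string repetition.
import Mathlib
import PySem

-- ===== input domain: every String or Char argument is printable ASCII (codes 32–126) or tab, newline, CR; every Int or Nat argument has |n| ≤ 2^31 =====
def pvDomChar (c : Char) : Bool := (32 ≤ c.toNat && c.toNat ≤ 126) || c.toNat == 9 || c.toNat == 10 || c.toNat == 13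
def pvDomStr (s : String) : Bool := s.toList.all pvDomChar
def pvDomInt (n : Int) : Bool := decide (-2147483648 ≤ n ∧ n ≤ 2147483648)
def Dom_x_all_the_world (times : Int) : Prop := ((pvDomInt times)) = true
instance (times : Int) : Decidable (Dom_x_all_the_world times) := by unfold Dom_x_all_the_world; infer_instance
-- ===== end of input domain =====

-- B replaces A's counting accumulation loop by divmod-3 on the iteration count plus string repetition (objective: simpler).

-- ===== PORT A =====
-- the loop body: x is ignored, the state is (out, count)
def pvStepA (s : String × Int) (_x : Int) : String × Int :=
  if s.2 == 2 then (s.1 ++ "é um palco ", 0)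
  else (s.1 ++ "o mundo inteiro ", s.2 + 1)

def x_all_the_world (times : Int) : String :=
  -- int(times/2): exact float division then truncation toward zero = Int.tdiv on the admitted domain
  let range_ : Int := Int.tdiv times 2
  let st := (PySem.List.pyRange 0 (times + range_) 1).foldl pvStepA ("", 0)
  PySem.Str.strip st.1

-- ===== PORT B =====
-- 's * n' (Python string repetition)
def pvMulStr (s : String) (n : Int) : String := String.join (List.replicate n.toNat s)

def x_all_the_world_alt (times : Int) : String :=
  let total : Int := times + Int.tdiv times 2
  if total ≤ 0 then ""
  else
    PySem.Str.strip
      (pvMulStr "o mundo inteiro o mundo inteiro é um palco " (PySem.Int.floordiv total 3) ++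
       pvMulStr "o mundo inteiro " (PySem.Int.mod total 3))

-- ===== PRECONDITION & SPEC =====
def Spec_x_all_the_world (times : Int) (out : String) : Prop := out = x_all_the_world_alt times
instance (times : Int) (out : String) : Decidable (Spec_x_all_the_world times out) := by unfold Spec_x_all_the_world; infer_instance

-- ===== CLAIM (what is proved, stated in full; the proofs are below) =====
def Claim_equal_x_all_the_world : Prop := ∀ (times : Int), Dom_x_all_the_world times → Spec_x_all_the_world times (x_all_the_world times)

-- ===== LEMMAS AND PROOFS =====

-- applying the (element-ignoring) loop body n times
def pvIterA : Nat → (String × Int) → (String × Int)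
  | 0, s => s
  | n + 1, s => pvIterA n (pvStepA s 0)

-- s ++ s ++ … ++ s (n copies), appended on the right
def pvRep (s : String) : Nat → String
  | 0 => ""
  | n + 1 => pvRep s n ++ s

lemma foldl_stepA_eq_iter (l : List Int) (s : String × Int) :
    l.foldl pvStepA s = pvIterA l.length s := by
  induction l generalizing s with
  | nil => rfl
  | cons a l ih =>
      simp only [List.foldl_cons, List.length_cons, pvIterA]
      exact ih _

lemma pvIterA_succ_right (n : Nat) (s : String × Int) :
    pvIterA (n + 1) s = pvStepA (pvIterA n s) 0 := by
  induction n generalizing s with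
  | zero => rfl
  | succ n ih => rw [pvIterA, ih]; rfl

lemma join_replicate_eq_pvRep (s : String) (k : Nat) :
    String.join (List.replicate k s) = pvRep s k := by
  induction k with
  | zero => rfl
  | succ k ih =>
      rw [List.replicate_succ']
      have h : String.join (List.replicate k s ++ [s]) =
          String.join (List.replicate k s) ++ s := by
        simp [String.join, List.foldl_append]
      rw [h, ih, pvRep]

lemma pvMulStr_natCast (s : String) (k : Nat) : pvMulStr s (k : Int) = pvRep s k := by
  rw [pvMulStr, Int.toNat_natCast, join_replicate_eq_pvRep]

lemma pvIterA_closed (n : Nat) :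
    pvIterA n ("", 0) =
      (pvRep "o mundo inteiro o mundo inteiro é um palco " (n / 3) ++
         pvRep "o mundo inteiro " (n % 3), ((n % 3 : Nat) : Int)) := by
  induction n with
  | zero => decide
  | succ n ih =>
      rw [pvIterA_succ_right, ih]
      by_cases h : n % 3 = 2
      · have hq : (n + 1) / 3 = n / 3 + 1 := by omega
        have hr : (n + 1) % 3 = 0 := by omega
        have hc : ((((n % 3 : Nat)) : Int) == 2) = true := by simp [h]
        have hb : pvRep "o mundo inteiro " 2 ++ "é um palco " =
            "o mundo inteiro o mundo inteiro é um palco " := by decide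
        simp only [pvStepA, hc, if_true, hq, hr, Prod.mk.injEq]
        refine ⟨?_, by simp⟩
        rw [h, String.append_assoc, hb]
        simp [pvRep]
      · have hq : (n + 1) / 3 = n / 3 := by omega
        have hr : (n + 1) % 3 = n % 3 + 1 := by omega
        have hc : ((((n % 3 : Nat)) : Int) == 2) = false := by
          simp; omega
        simp only [pvStepA, hc, Bool.false_eq_true, if_false, hq, hr, Prod.mk.injEq]
        refine ⟨?_, by push_cast; ring⟩
        rw [pvRep, String.append_assoc]

-- ===== VERDICT (by name: the statement is the Claim_ definition above) =====
theorem x_all_the_world_spec : Claim_equal_x_all_the_world := by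
  intro times _
  unfold Spec_x_all_the_world x_all_the_world x_all_the_world_alt
  simp only []
  set total : Int := times + Int.tdiv times 2 with htot
  rw [PySem.List.pyRange_one, foldl_stepA_eq_iter]
  simp only [List.length_map, List.length_range, sub_zero]
  rw [pvIterA_closed]
  by_cases h : total ≤ 0
  · have h0 : total.toNat = 0 := by omega
    rw [h0, if_pos h]
    decide
  · rw [if_neg h]
    obtain ⟨k, hk⟩ : ∃ k : Nat, total = (k : Int) := ⟨total.toNat, by omega⟩
    have hq : PySem.Int.floordiv total 3 = ((k / 3 : Nat) : Int) := by
      rw [hk, PySem.Int.floordiv, Int.fdiv_eq_ediv]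
      norm_num [Int.natCast_ediv]
    have hr : PySem.Int.mod total 3 = ((k % 3 : Nat) : Int) := by
      rw [hk, PySem.Int.mod, Int.fmod_eq_emod]
      norm_num [Int.natCast_emod]
    rw [hq, hr, pvMulStr_natCast, pvMulStr_natCast, hk, Int.toNat_natCast]
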